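-- pv_equiv track=rewrite | github.com/langflow-ai/langflow | src/backend/base/langflow/graph/graph/utils.py | refine_layers
-- ===== SOURCE A (Python) =====
-- from collections import defaultdict, deque
--
-- def refine_layers(
--     initial_layers: list[list[str]],
--     successor_map: dict[str, list[str]],
-- ) -> list[list[str]]:
--     """Refines the layers of vertices to ensure proper dependency ordering.
--
--     Args:
--         initial_layers: Initial layers of vertices
--         successor_map: Map of vertex IDs to their successors
--
--     Returns:
--         Refined layers with proper dependency ordering
--     """
--     # Map each vertex to its current layer
--     vertex_to_layer: dict[str, int] = {}
--     for layer_index, layer in enumerate(initial_layers):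
--         for vertex in layer:
--             vertex_to_layer[vertex] = layer_index
--
--     refined_layers: list[list[str]] = [[] for _ in initial_layers]  # Start with empty layers
--     new_layer_index_map = defaultdict(int)
--
--     # Map each vertex to its new layer index
--     # by finding the lowest layer index of its dependencies
--     # and subtracting 1
--     # If a vertex has no dependencies, it will be placed in the first layer
--     # If a vertex has dependencies, it will be placed in the lowest layer index of its dependencies
--     # minus 1
--     for vertex_id, deps in successor_map.items():
--         indexes = [vertex_to_layer[dep] for dep in deps if dep in vertex_to_layer]
--         new_layer_index = max(min(indexes, default=0) - 1, 0)
--         new_layer_index_map[vertex_id] = new_layer_index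
--
--     for layer_index, layer in enumerate(initial_layers):
--         for vertex_id in layer:
--             # Place the vertex in the highest possible layer where its dependencies are met
--             new_layer_index = new_layer_index_map[vertex_id]
--             if new_layer_index > layer_index:
--                 refined_layers[new_layer_index].append(vertex_id)
--                 vertex_to_layer[vertex_id] = new_layer_index
--             else:
--                 refined_layers[layer_index].append(vertex_id)
--
--     # Remove empty layers if any
--     return [layer for layer in refined_layers if layer]
-- ===== SOURCE B (Python) =====
-- def refine_layers(
--     initial_layers: list[list[str]],
--     successor_map: dict[str, list[str]],
-- ) -> list[list[str]]:
--     """Refines the layers of vertices to ensure proper dependency ordering."""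
--     # Snapshot of each vertex's original layer (last occurrence wins, as in A).
--     vertex_to_layer = {v: i for i, layer in enumerate(initial_layers) for v in layer}
--
--     def target(vertex_id: str, layer_index: int) -> int:
--         indexes = [vertex_to_layer[d] for d in successor_map.get(vertex_id, []) if d in vertex_to_layer]
--         return max(max(min(indexes, default=0) - 1, 0), layer_index)
--
--     # Every vertex tagged with its final layer, in traversal order.
--     placed = [(target(v, i), v) for i, layer in enumerate(initial_layers) for v in layer]
--
--     layers = [[v for t, v in placed if t == j] for j in range(len(initial_layers))]
--     return [layer for layer in layers if layer]
-- ===== Notes on version B (the rewrite author's own statement) =====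
-- stated objective: simpler
-- what changed: Drops A's intermediate defaultdict and its mutation of vertex_to_layer and the preallocated bucket lists: B computes each vertex's final layer inline from an unmutated snapshot and builds the output layers by per-layer comprehensions over the tagged vertex list.
import Mathlib
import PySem

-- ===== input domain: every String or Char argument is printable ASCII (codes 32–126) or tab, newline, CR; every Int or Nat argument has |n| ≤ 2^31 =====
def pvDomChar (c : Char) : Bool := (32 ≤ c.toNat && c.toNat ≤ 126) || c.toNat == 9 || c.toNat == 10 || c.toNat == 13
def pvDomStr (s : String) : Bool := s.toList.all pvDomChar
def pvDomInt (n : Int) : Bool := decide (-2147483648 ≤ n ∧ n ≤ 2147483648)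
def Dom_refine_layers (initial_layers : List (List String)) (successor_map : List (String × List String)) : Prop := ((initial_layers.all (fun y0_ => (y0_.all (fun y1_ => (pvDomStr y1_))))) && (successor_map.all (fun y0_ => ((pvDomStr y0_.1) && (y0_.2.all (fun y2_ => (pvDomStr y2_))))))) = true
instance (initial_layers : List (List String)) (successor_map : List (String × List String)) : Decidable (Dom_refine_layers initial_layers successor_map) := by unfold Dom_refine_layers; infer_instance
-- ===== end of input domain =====

-- B drops A's intermediate defaultdict, its dead mutation of vertex_to_layer and the preallocated
-- bucket lists: it tags each vertex with its final layer inline and builds the output by per-layer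
-- comprehensions (objective: simpler; same return value).

-- ===== PORT A =====
-- `indexes = [vertex_to_layer[dep] for dep in deps if dep in vertex_to_layer]`;
-- `max(min(indexes, default=0) - 1, 0)`
def pvNewIdxA (vtl : PySem.Dict String Int) (deps : List String) : Int :=
  let indexes := (deps.filter (fun dep => vtl.contains dep)).map (fun dep => vtl.getD dep 0)
  max (PySem.List.minD indexes (fun x => x) 0 - 1) 0

def refine_layers (initial_layers : List (List String)) (successor_map : List (String × List String)) : List (List String) :=
  -- vertex_to_layer built by the first double loop
  let vertex_to_layer : PySem.Dict String Int :=
    (PySem.List.enumerate initial_layers 0).foldl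
      (fun d p => p.2.foldl (fun d v => d.insert v p.1) d) PySem.Dict.empty
  -- refined_layers = [[] for _ in initial_layers]
  let refined0 : List (List String) := initial_layers.map (fun _ => ([] : List String))
  -- new_layer_index_map = defaultdict(int), filled by the second loop (dict iteration;
  -- exact under Pre_: unique keys); missing keys read as 0 via getD
  let nlm : PySem.Dict String Int :=
    successor_map.foldl (fun m p => m.insert p.1 (pvNewIdxA vertex_to_layer p.2)) PySem.Dict.empty
  -- third loop; state = (refined_layers, vertex_to_layer); `refined_layers[i].append(v)` is
  -- List.modify (exact here: every produced index is a valid layer index, so Python never raises)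
  let final :=
    (PySem.List.enumerate initial_layers 0).foldl
      (fun (st : List (List String) × PySem.Dict String Int) p =>
        p.2.foldl (fun st v =>
          let nli := nlm.getD v 0
          if nli > p.1 then
            (st.1.modify nli.toNat (fun l => l ++ [v]), st.2.insert v nli)
          else
            (st.1.modify p.1.toNat (fun l => l ++ [v]), st.2)) st)
      (refined0, vertex_to_layer)
  -- [layer for layer in refined_layers if layer]
  final.1.filter (fun l => !l.isEmpty)

-- ===== PORT B =====
-- B's `target(vertex_id, layer_index)`: deps looked up first, then
-- max(max(min(indexes, default=0) - 1, 0), layer_index)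
def pvTargetB (vtl : PySem.Dict String Int) (deps : List String) (i : Int) : Int :=
  let indexes := (deps.filter (fun d => vtl.contains d)).map (fun d => vtl.getD d 0)
  max (max (PySem.List.minD indexes (fun x => x) 0 - 1) 0) i

def refine_layers_alt (initial_layers : List (List String)) (successor_map : List (String × List String)) : List (List String) :=
  -- the dict comprehension {v: i for i, layer in enumerate(initial_layers) for v in layer}
  let vertex_to_layer : PySem.Dict String Int :=
    (PySem.List.enumerate initial_layers 0).foldl
      (fun d p => p.2.foldl (fun d v => d.insert v p.1) d) PySem.Dict.empty
  -- placed = [(target(v, i), v) for i, layer in enumerate(initial_layers) for v in layer]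
  let placed : List (Int × String) :=
    (PySem.List.enumerate initial_layers 0).flatMap
      (fun p => p.2.map (fun v =>
        (pvTargetB vertex_to_layer ((PySem.Dict.mk successor_map).getD v []) p.1, v)))
  -- layers = [[v for t, v in placed if t == j] for j in range(len(initial_layers))]
  let layers := (PySem.List.pyRange 0 (initial_layers.length : Int) 1).map
      (fun j => (placed.filter (fun q => q.1 == j)).map (fun q => q.2))
  layers.filter (fun l => !l.isEmpty)

-- ===== PRECONDITION & SPEC =====
-- Pre_ excludes association lists with duplicate keys: they do not represent a Python dict
-- (the `successor_map` parameter is a dict, whose keys are unique), and A's items()-iteration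
-- vs B's .get() would read different duplicates.
def Pre_refine_layers (initial_layers : List (List String)) (successor_map : List (String × List String)) : Prop :=
  (successor_map.map Prod.fst).Nodup
instance (initial_layers : List (List String)) (successor_map : List (String × List String)) : Decidable (Pre_refine_layers initial_layers successor_map) := by unfold Pre_refine_layers; infer_instance

def pvWitness_refine_layers : List (List String) × (List (String × List String)) :=
  ([["a"], ["b"]], [("a", ["b"])])

def Spec_refine_layers (initial_layers : List (List String)) (successor_map : List (String × List String)) (out : List (List String)) : Prop := out = refine_layers_alt initial_layers successor_map
instance (initial_layers : List (List String)) (successor_map : List (String × List String)) (out : List (List String)) : Decidable (Spec_refine_layers initial_layers successor_map out) := by unfold Spec_refine_layers; infer_instance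

-- ===== CLAIM (what is proved, stated in full; the proofs are below) =====
def Claim_equal_refine_layers : Prop := ∀ (initial_layers : List (List String)) (successor_map : List (String × List String)), Dom_refine_layers initial_layers successor_map → Pre_refine_layers initial_layers successor_map → Spec_refine_layers initial_layers successor_map (refine_layers initial_layers successor_map)

-- ===== LEMMAS AND PROOFS =====

-- A's second loop, looked up afterwards: under unique keys the built dict reads as
-- "apply f to the first-match lookup" (f of [] for absent keys, since m0 = empty and f [] = 0).
lemma getD_foldl_insert_lookup (f : List String → Int)
    (sm : List (String × List String)) (m0 : PySem.Dict String Int)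
    (hnd : (sm.map Prod.fst).Nodup) (v : String) :
    (sm.foldl (fun m p => m.insert p.1 (f p.2)) m0).getD v 0
      = match (PySem.Dict.mk sm).get? v with
        | some d => f d
        | none => m0.getD v 0 := by
  induction sm generalizing m0 with
  | nil => simp [PySem.Dict.get?]
  | cons hd tl ih =>
    simp only [List.map_cons, List.nodup_cons] at hnd
    simp only [List.foldl_cons]
    rw [ih _ hnd.2]
    rw [PySem.Dict.get?_mk_cons]
    by_cases hv : hd.1 = v
    · subst hv
      have hnone : (PySem.Dict.mk tl).get? hd.1 = none := by
        rw [PySem.Dict.get?_eq_none_iff_not_mem_keys]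
        simpa [PySem.Dict.keys] using hnd.1
      simp [hnone, PySem.Dict.getD_insert_self]
    · have : (hd.1 == v) = false := by simp [hv]
      simp only [this, Bool.false_eq_true, if_false]
      have hv' : v ≠ hd.1 := fun h => hv h.symm
      cases h : (PySem.Dict.mk tl).get? v with
      | some d => simp
      | none => simp [PySem.Dict.getD_insert, hv']

lemma nlm_getD_eq (vtl : PySem.Dict String Int) (sm : List (String × List String))
    (hnd : (sm.map Prod.fst).Nodup) (v : String) :
    (sm.foldl (fun m p => m.insert p.1 (pvNewIdxA vtl p.2)) PySem.Dict.empty).getD v 0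
      = pvNewIdxA vtl ((PySem.Dict.mk sm).getD v []) := by
  rw [getD_foldl_insert_lookup _ _ _ hnd, PySem.Dict.getD_eq_get?_getD]
  cases h : (PySem.Dict.mk sm).get? v with
  | some d => simp [PySem.Dict.getD_eq_get?_getD, h]
  | none =>
    rw [PySem.Dict.getD_eq_get?_getD, h]
    simp [pvNewIdxA, PySem.List.minD, PySem.List.min?]

-- the branch of A's third loop picks exactly max(new, i)
lemma ite_gt_eq_max (a i : Int) : (if a > i then a else i) = max a i := by
  rcases le_total a i with h | h
  · simp [max_def, h]
  · rcases eq_or_lt_of_le h with h' | h'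
    · simp [h']
    · simp [max_def]
      omega

lemma pvTargetB_eq (vtl : PySem.Dict String Int) (deps : List String) (i : Int) :
    pvTargetB vtl deps i = max (pvNewIdxA vtl deps) i := rfl

-- A's third loop ignores its second state component and is the bucket fold over the tagged list
lemma third_loop_fst (nlm : PySem.Dict String Int) (E : List (Int × List String))
    (acc : List (List String)) (d : PySem.Dict String Int) :
    (E.foldl
      (fun (st : List (List String) × PySem.Dict String Int) p =>
        p.2.foldl (fun st v =>
          let nli := nlm.getD v 0
          if nli > p.1 then
            (st.1.modify nli.toNat (fun l => l ++ [v]), st.2.insert v nli)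
          else
            (st.1.modify p.1.toNat (fun l => l ++ [v]), st.2)) st)
      (acc, d)).1
    = (E.flatMap (fun p => p.2.map (fun v => ((if nlm.getD v 0 > p.1 then nlm.getD v 0 else p.1), v)))).foldl
        (fun l (q : Int × String) => l.modify q.1.toNat (fun t => t ++ [q.2])) acc := by
  induction E generalizing acc d with
  | nil => simp
  | cons hd tl ih =>
    simp only [List.foldl_cons, List.flatMap_cons, List.foldl_append]
    obtain ⟨i, layer⟩ := hd
    induction layer generalizing acc d with
    | nil => simpa using ih acc d
    | cons x xs ihx =>
      simp only [List.foldl_cons, List.map_cons]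
      by_cases h : nlm.getD x 0 > i
      · simpa [h] using ihx (acc.modify (nlm.getD x 0).toNat (fun l => l ++ [x])) (d.insert x (nlm.getD x 0))
      · simpa [h] using ihx (acc.modify i.toNat (fun l => l ++ [x])) d

lemma bucket_fold_length (ps : List (Int × String)) (acc : List (List String)) :
    (ps.foldl (fun l (q : Int × String) => l.modify q.1.toNat (fun t => t ++ [q.2])) acc).length
      = acc.length := by
  induction ps generalizing acc with
  | nil => rfl
  | cons hd tl ih => simp [List.foldl_cons, ih]

lemma bucket_fold_getElem (ps : List (Int × String)) (hs : ∀ q ∈ ps, 0 ≤ q.1)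
    (acc : List (List String)) (j : Nat) (hj : j < acc.length) :
    (ps.foldl (fun l (q : Int × String) => l.modify q.1.toNat (fun t => t ++ [q.2])) acc)[j]'(by rw [bucket_fold_length]; exact hj)
      = acc[j] ++ (ps.filter (fun q => q.1 == (j : Int))).map (fun q => q.2) := by
  induction ps generalizing acc with
  | nil => simp
  | cons hd tl ih =>
    have hhd : 0 ≤ hd.1 := hs hd (List.mem_cons_self)
    have htl : ∀ q ∈ tl, 0 ≤ q.1 := fun q hq => hs q (List.mem_cons_of_mem _ hq)
    simp only [List.foldl_cons, List.filter_cons]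
    by_cases h : hd.1 = (j : Int)
    · have hn : hd.1.toNat = j := by omega
      rw [ih htl _ (by simpa using hj)]
      simp [h, hn]
    · have hn : hd.1.toNat ≠ j := by omega
      have hb : (hd.1 == (j : Int)) = false := by simpa using h
      rw [ih htl _ (by simpa using hj)]
      simp [hb, List.getElem_modify]
      exact hn

-- ===== VERDICT (by name: the statement is the Claim_ definition above) =====
theorem refine_layers_spec : Claim_equal_refine_layers := by
  intro il sm _hdom hpre
  unfold Spec_refine_layers refine_layers refine_layers_alt
  simp only []
  set vtl : PySem.Dict String Int :=
    (PySem.List.enumerate il 0).foldl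
      (fun d p => p.2.foldl (fun d v => d.insert v p.1) d) PySem.Dict.empty with hvtl
  have hnlm : ∀ v, (sm.foldl (fun m p => m.insert p.1 (pvNewIdxA vtl p.2)) PySem.Dict.empty).getD v 0
      = pvNewIdxA vtl ((PySem.Dict.mk sm).getD v []) := nlm_getD_eq vtl sm hpre
  rw [third_loop_fst]
  set placed : List (Int × String) :=
    (PySem.List.enumerate il 0).flatMap
      (fun p => p.2.map (fun v =>
        (pvTargetB vtl ((PySem.Dict.mk sm).getD v []) p.1, v))) with hplaced
  have hP : (PySem.List.enumerate il 0).flatMap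
      (fun p => p.2.map (fun v =>
        ((if (sm.foldl (fun m p => m.insert p.1 (pvNewIdxA vtl p.2)) PySem.Dict.empty).getD v 0 > p.1
          then (sm.foldl (fun m p => m.insert p.1 (pvNewIdxA vtl p.2)) PySem.Dict.empty).getD v 0
          else p.1), v))) = placed := by
    rw [hplaced]
    exact List.flatMap_congr (fun p _ => List.map_congr_left
      (fun v _ => by rw [hnlm v, ite_gt_eq_max, pvTargetB_eq]))
  rw [hP]
  have hnn : ∀ q ∈ placed, 0 ≤ q.1 := by
    intro q hq
    rw [hplaced] at hq
    simp only [List.mem_flatMap, List.mem_map] at hq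
    obtain ⟨p, _, v, _, rfl⟩ := hq
    exact le_trans (le_trans (le_max_right _ _) (le_max_left _ _)) rfl.le
  -- both sides are length-(il.length) lists of buckets, then filtered
  congr 1
  apply List.ext_getElem
  · rw [bucket_fold_length]
    simp [PySem.List.pyRange_zero_nat]
  · intro j hj hj'
    have hjn : j < il.length := by
      rw [bucket_fold_length] at hj; simpa using hj
    rw [bucket_fold_getElem placed hnn _ j (by simpa using hjn)]
    simp [PySem.List.pyRange_zero_nat]
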